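-- pv_equiv track=rewrite | github.com/detective-sokka/Competitive-Programming | OtherProblems/CodeChecf/ALTARAY.py | Alt_SubArray_Count
-- ===== SOURCE A (Python) =====
-- def CheckAlternating(a, b):
--     if a >= 0 and b < 0:
--         return True
--     elif a < 0 and b >= 0:
--         return True
--     else:
--         return False
--
-- def Alt_SubArray_Count(input_list, input_len):
--     list_ = [1] * input_len
--     i = input_len - 2
--
--     while i >= 0:
--         if CheckAlternating(input_list[i], input_list[i + 1]):
--             list_[i] += list_[i + 1]
--         i -= 1
--
--     return map(str, list_)
-- ===== SOURCE B (Python) =====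
-- def Alt_SubArray_Count(input_list, input_len):
--     out = []
--     i = 0
--     while i < input_len:
--         j = i + 1
--         while j < input_len and (input_list[j - 1] >= 0) != (input_list[j] >= 0):
--             j += 1
--         # maximal alternating run spans [i, j); count at position k is j - k
--         out.extend(range(j - i, 0, -1))
--         i = j
--     return map(str, out)
-- ===== Notes on version B (the rewrite author's own statement) =====
-- stated objective: alternative
-- what changed: Replaces A's backward dynamic-programming pass over a preallocated counts array (list_[i] += list_[i+1]) with a forward two-pointer scan that finds each maximal alternating run [i,j) and emits its counts j-i, j-i-1, ..., 1 directly.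
import Mathlib
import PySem

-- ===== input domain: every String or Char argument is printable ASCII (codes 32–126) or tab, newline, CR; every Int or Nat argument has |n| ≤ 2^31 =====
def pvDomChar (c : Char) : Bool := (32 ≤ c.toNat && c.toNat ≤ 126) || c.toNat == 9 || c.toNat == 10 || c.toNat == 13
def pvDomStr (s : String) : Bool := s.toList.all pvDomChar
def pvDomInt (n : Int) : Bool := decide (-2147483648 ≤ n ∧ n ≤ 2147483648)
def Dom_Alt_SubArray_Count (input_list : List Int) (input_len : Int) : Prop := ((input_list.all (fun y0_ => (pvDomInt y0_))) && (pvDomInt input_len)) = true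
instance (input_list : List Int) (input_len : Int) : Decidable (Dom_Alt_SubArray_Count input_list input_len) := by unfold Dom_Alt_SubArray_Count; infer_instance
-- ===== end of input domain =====

-- B replaces A's backward dynamic programming by a forward scan over maximal alternating
-- runs (same O(n) cost, alternative algorithm); equivalence is about the RETURN value.

-- shared indexing helper: input_list[k] for a nonnegative index (IndexError excluded by Pre_)
def pvElem (xs : List Int) (k : Nat) : Int := (PySem.List.pyGet? xs (k : Int)).getD 0

-- ===== PORT A =====
def CheckAlternating (a b : Int) : Bool :=
  if 0 ≤ a ∧ b < 0 then true
  else if a < 0 ∧ 0 ≤ b then true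
  else false

-- the while loop of A: fuel m processes indices m-1, m-2, …, 0 (Python's i = input_len-2 … 0)
def pvLoopA (xs : List Int) (arr : List Int) : Nat → List Int
  | 0 => arr
  | i + 1 =>
    pvLoopA xs
      (if CheckAlternating (pvElem xs i) (pvElem xs (i + 1))
        then arr.set i (arr.getD i 0 + arr.getD (i + 1) 0)
        else arr) i

def Alt_SubArray_Count (input_list : List Int) (input_len : Int) : List String :=
  (pvLoopA input_list (List.replicate input_len.toNat 1) (input_len - 1).toNat).map PySem.Int.toStr

-- ===== PORT B =====
-- (input_list[j-1] >= 0) != (input_list[j] >= 0)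
def pvAltB (a b : Int) : Bool := decide (0 ≤ a) != decide (0 ≤ b)

-- inner while: advance j while j < n and the run keeps alternating
-- (structural recursion on a fuel counter; fuel n is always enough since j ≤ n throughout)
def pvRunEnd (xs : List Int) (n : Nat) : Nat → Nat → Nat
  | 0, j => j
  | f + 1, j =>
    if j < n then
      if pvAltB (pvElem xs (j - 1)) (pvElem xs j) then pvRunEnd xs n f (j + 1) else j
    else j

-- out.extend(range(L, 0, -1))
def pvEmit : Nat → List Int
  | 0 => []
  | L + 1 => ((L : Int) + 1) :: pvEmit L

-- outer while: emit the counts of one maximal run, continue after it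
-- (fuel n is always enough: each iteration advances i by at least one)
def pvGoB (xs : List Int) (n : Nat) : Nat → Nat → List Int
  | 0, _ => []
  | f + 1, i =>
    if i < n then
      pvEmit (pvRunEnd xs n n (i + 1) - i) ++ pvGoB xs n f (pvRunEnd xs n n (i + 1))
    else []

def Alt_SubArray_Count_alt (input_list : List Int) (input_len : Int) : List String :=
  (pvGoB input_list input_len.toNat input_len.toNat 0).map PySem.Int.toStr

-- ===== PRECONDITION & SPEC =====
-- Pre_ excludes exactly the inputs where Python A raises IndexError: input_len ≥ 2 with
-- fewer than input_len list elements.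
def Pre_Alt_SubArray_Count (input_list : List Int) (input_len : Int) : Prop :=
  input_len ≤ input_list.length ∨ input_len ≤ 1
instance (input_list : List Int) (input_len : Int) : Decidable (Pre_Alt_SubArray_Count input_list input_len) := by unfold Pre_Alt_SubArray_Count; infer_instance

def pvWitness_Alt_SubArray_Count : List Int × Int := ([1, -2, 3, 4], 4)

def Spec_Alt_SubArray_Count (input_list : List Int) (input_len : Int) (out : List String) : Prop := out = Alt_SubArray_Count_alt input_list input_len
instance (input_list : List Int) (input_len : Int) (out : List String) : Decidable (Spec_Alt_SubArray_Count input_list input_len out) := by unfold Spec_Alt_SubArray_Count; infer_instance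

-- ===== CLAIM (what is proved, stated in full; the proofs are below) =====
def Claim_equal_Alt_SubArray_Count : Prop := ∀ (input_list : List Int) (input_len : Int), Dom_Alt_SubArray_Count input_list input_len → Pre_Alt_SubArray_Count input_list input_len → Spec_Alt_SubArray_Count input_list input_len (Alt_SubArray_Count input_list input_len)

-- ===== LEMMAS AND PROOFS =====

-- the common characterisation: pvF i = length of the maximal alternating run starting at i (as Int)
def pvF (xs : List Int) (n : Nat) (i : Nat) : Int :=
  if _h : i + 1 < n ∧ pvAltB (pvElem xs i) (pvElem xs (i + 1)) then pvF xs n (i + 1) + 1 else 1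
termination_by n - i
decreasing_by omega

theorem pvCheck_eq_alt (a b : Int) : CheckAlternating a b = pvAltB a b := by
  unfold CheckAlternating pvAltB
  by_cases ha : 0 ≤ a <;> by_cases hb : 0 ≤ b <;> simp [ha, hb] <;> omega

theorem pvLoopA_length (xs arr : List Int) (m : Nat) :
    (pvLoopA xs arr m).length = arr.length := by
  induction m generalizing arr with
  | zero => rfl
  | succ i ih =>
    rw [pvLoopA]
    split <;> simp [ih]

theorem pvLoopA_invariant (xs : List Int) (n : Nat) :
    ∀ m arr, arr.length = n → m + 1 ≤ n →
      (∀ j, m ≤ j → j < n → arr.getD j 0 = pvF xs n j) →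
      (∀ j, j < m → arr.getD j 0 = 1) →
      ∀ j, j < n → (pvLoopA xs arr m).getD j 0 = pvF xs n j := by
  intro m
  induction m with
  | zero => intro arr _ _ hhi _ j hj; exact hhi j (Nat.zero_le j) hj
  | succ i ih =>
    intro arr hlen hm hhi hlo j hj
    rw [pvLoopA, pvCheck_eq_alt]
    have hi1 : i + 1 < n := hm
    have hfi : pvF xs n i =
        if pvAltB (pvElem xs i) (pvElem xs (i + 1)) then pvF xs n (i + 1) + 1 else 1 := by
      rw [pvF]; by_cases hc : pvAltB (pvElem xs i) (pvElem xs (i + 1)) = true <;>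
        simp [hc, hi1]
    set arr' := if pvAltB (pvElem xs i) (pvElem xs (i + 1)) = true
      then arr.set i (arr.getD i 0 + arr.getD (i + 1) 0) else arr with harr'
    have hlen' : arr'.length = n := by
      rw [harr']; split <;> simp [hlen]
    have hget : ∀ k, k < n → arr'.getD k 0 = if k = i then pvF xs n i else arr.getD k 0 := by
      intro k hk
      rw [harr', hfi]
      by_cases hc : pvAltB (pvElem xs i) (pvElem xs (i + 1)) = true
      · simp only [hc, if_true]
        by_cases hk' : k = i
        · subst hk'
          have h1 : arr.getD k 0 = 1 := hlo k (Nat.lt_succ_self k)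
          have h2 : arr.getD (k + 1) 0 = pvF xs n (k + 1) := hhi (k + 1) (Nat.le_refl _) hi1
          rw [List.getD_eq_getElem?_getD, List.getElem?_set_self (by omega), h1, h2]
          simp [Int.add_comm]
        · rw [List.getD_eq_getElem?_getD, List.getElem?_set_ne (by omega),
            ← List.getD_eq_getElem?_getD]
          simp [hk']
      · simp only [hc]
        simp only [Bool.false_eq_true, if_false]
        by_cases hk' : k = i
        · subst hk'; rw [if_pos rfl]; exact hlo k (Nat.lt_succ_self k)
        · simp [hk']
    apply ih arr' hlen' (by omega)
    · intro k hk1 hk2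
      rw [hget k hk2]
      by_cases hk' : k = i <;> simp [hk']
      exact hhi k (by omega) hk2
    · intro k hk
      rw [hget k (by omega)]
      have hne : ¬ k = i := by omega
      simp [hne]
      exact hlo k (by omega)
    · exact hj

theorem pvA_char (xs : List Int) (n : Nat) :
    pvLoopA xs (List.replicate n 1) (n - 1) = (List.range n).map (pvF xs n) := by
  apply List.ext_getElem
  · simp [pvLoopA_length]
  · intro j hj1 hj2
    have hjn : j < n := by simpa [pvLoopA_length] using hj1
    have hres : (pvLoopA xs (List.replicate n 1) (n - 1)).getD j 0 = pvF xs n j := by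
      rcases Nat.eq_zero_or_pos n with hn | hn
      · omega
      · apply pvLoopA_invariant xs n (n - 1) _ (by simp) (by omega)
        · intro k hk1 hk2
          have hk : k = n - 1 := by omega
          subst hk
          rw [pvF]
          have hlt : ¬ (n - 1 + 1 < n) := by omega
          have hrep : n - 1 < n := by omega
          simp [hlt, List.getD_eq_getElem?_getD, hrep]
        · intro k hk
          have hkn : k < n := by omega
          simp [List.getD_eq_getElem?_getD, hkn]
        · exact hjn
    have h1 : (pvLoopA xs (List.replicate n 1) (n - 1))[j] = pvF xs n j := by
      rw [List.getD_eq_getElem?_getD, List.getElem?_eq_getElem hj1, Option.getD_some] at hres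
      exact hres
    simp [h1]

-- facts about pvRunEnd
theorem pvRunEnd_ge (xs : List Int) (n : Nat) :
    ∀ f j, j ≤ pvRunEnd xs n f j := by
  intro f
  induction f with
  | zero => intro j; simp [pvRunEnd]
  | succ f ih =>
    intro j
    rw [pvRunEnd]
    by_cases hj : j < n
    · by_cases halt : pvAltB (pvElem xs (j - 1)) (pvElem xs j) = true
      · simp only [if_pos hj, if_pos halt]
        have := ih (j + 1); omega
      · simp [hj, halt]
    · simp [hj]

theorem pvRunEnd_le (xs : List Int) (n : Nat) :
    ∀ f j, j ≤ n → pvRunEnd xs n f j ≤ n := by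
  intro f
  induction f with
  | zero => intro j h; simpa [pvRunEnd] using h
  | succ f ih =>
    intro j h
    rw [pvRunEnd]
    by_cases hj : j < n
    · by_cases halt : pvAltB (pvElem xs (j - 1)) (pvElem xs j) = true
      · simp only [if_pos hj, if_pos halt]
        exact ih (j + 1) (by omega)
      · simp [hj, halt]; omega
    · simp [hj]; omega

theorem pvRunEnd_alt (xs : List Int) (n : Nat) :
    ∀ f j k, j ≤ k → k < pvRunEnd xs n f j →
      pvAltB (pvElem xs (k - 1)) (pvElem xs k) = true := by
  intro f
  induction f with
  | zero => intro j k hk1 hk2; rw [pvRunEnd] at hk2; omega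
  | succ f ih =>
    intro j k hk1 hk2
    rw [pvRunEnd] at hk2
    by_cases hj : j < n
    · by_cases halt : pvAltB (pvElem xs (j - 1)) (pvElem xs j) = true
      · simp only [if_pos hj, if_pos halt] at hk2
        rcases Nat.eq_or_lt_of_le hk1 with h | h
        · subst h; exact halt
        · exact ih (j + 1) k h hk2
      · simp [hj, halt] at hk2; omega
    · simp [hj] at hk2; omega

theorem pvRunEnd_break (xs : List Int) (n : Nat) :
    ∀ f j, n ≤ f + j → pvRunEnd xs n f j < n →
      pvAltB (pvElem xs (pvRunEnd xs n f j - 1)) (pvElem xs (pvRunEnd xs n f j)) = false := by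
  intro f
  induction f with
  | zero => intro j hf hlt; rw [pvRunEnd] at hlt; omega
  | succ f ih =>
    intro j hf hlt
    rw [pvRunEnd] at hlt ⊢
    by_cases hj : j < n
    · by_cases halt : pvAltB (pvElem xs (j - 1)) (pvElem xs j) = true
      · simp only [if_pos hj, if_pos halt] at hlt ⊢
        exact ih (j + 1) (by omega) hlt
      · rw [if_pos hj, if_neg halt] at hlt ⊢
        simpa using halt
    · simp [hj] at hlt

-- inside a run ending at jend, pvF counts down to the run's end
theorem pvF_run (xs : List Int) (n : Nat) (jend : Nat) (hle : jend ≤ n)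
    (hbreak : jend < n → pvAltB (pvElem xs (jend - 1)) (pvElem xs jend) = false) :
    ∀ d k, k + d + 1 = jend →
      (∀ t, k < t → t < jend → pvAltB (pvElem xs (t - 1)) (pvElem xs t) = true) →
      pvF xs n k = (jend : Int) - (k : Int) := by
  intro d
  induction d with
  | zero =>
    intro k hk _
    rw [pvF]
    have hcond : ¬ (k + 1 < n ∧ pvAltB (pvElem xs k) (pvElem xs (k + 1)) = true) := by
      rintro ⟨h1, h2⟩
      have hjlt : jend < n := by omega
      have hb := hbreak hjlt
      have hk1 : jend - 1 = k := by omega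
      have hk2 : jend = k + 1 := by omega
      rw [hk1, hk2] at hb
      simp [hb] at h2
    rw [dif_neg hcond]
    have : (jend : Int) = (k : Int) + 1 := by omega
    omega
  | succ d ihd =>
    intro k hk halt
    have hklt : k + 1 < jend := by omega
    have haltk : pvAltB (pvElem xs k) (pvElem xs (k + 1)) = true := by
      have := halt (k + 1) (by omega) hklt
      simpa using this
    rw [pvF]
    have hcond : k + 1 < n ∧ pvAltB (pvElem xs k) (pvElem xs (k + 1)) = true :=
      ⟨by omega, haltk⟩
    rw [dif_pos hcond]
    have := ihd (k + 1) (by omega) (fun t ht1 ht2 => halt t (by omega) ht2)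
    rw [this]
    push_cast
    ring

theorem pvEmit_eq (L : Nat) : ∀ s : Nat,
    pvEmit L = (List.range' s L).map (fun k : Nat => ((s : Int) + (L : Int) - (k : Int))) := by
  induction L with
  | zero => intro s; simp [pvEmit]
  | succ L ihL =>
    intro s
    rw [pvEmit, List.range'_succ, List.map_cons]
    refine congrArg₂ List.cons ?_ ?_
    · push_cast; ring
    · rw [ihL (s + 1)]
      apply List.map_congr_left
      intro k _
      push_cast; ring

theorem pvGoB_char (xs : List Int) (n : Nat) :
    ∀ f i, n - i ≤ f → pvGoB xs n f i = (List.range' i (n - i)).map (pvF xs n) := by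
  intro f
  induction f with
  | zero =>
    intro i hf
    have hni : n - i = 0 := by omega
    simp [pvGoB, hni]
  | succ f ih =>
    intro i hf
    rw [pvGoB]
    by_cases hi : i < n
    · simp only [hi, if_pos]
      set j := pvRunEnd xs n n (i + 1) with hj
      have hge : i + 1 ≤ j := pvRunEnd_ge xs n n (i + 1)
      have hjle : j ≤ n := pvRunEnd_le xs n n (i + 1) (by omega)
      have hsplit : List.range' i (n - i) = List.range' i (j - i) ++ List.range' j (n - j) := by
        have h0 := @List.range'_append_1 i (j - i) (n - j)
        have h1 : i + (j - i) = j := by omega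
        rw [h1] at h0
        have h2 : j - i + (n - j) = n - i := by omega
        rw [← h2]
        exact h0.symm
      rw [hsplit, List.map_append, ih j (by omega)]
      congr 1
      rw [pvEmit_eq (j - i) i]
      apply List.map_congr_left
      intro k hk
      have hk' : i ≤ k ∧ k < i + (j - i) := List.mem_range'_1.mp hk
      have hkj : k < j := by omega
      have hbrk : j < n → pvAltB (pvElem xs (j - 1)) (pvElem xs j) = false :=
        pvRunEnd_break xs n n (i + 1) (by omega)
      have hrun : pvF xs n k = (j : Int) - (k : Int) := by
        apply pvF_run xs n j hjle hbrk (j - k - 1) k (by omega)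
        intro t ht1 ht2
        exact pvRunEnd_alt xs n n (i + 1) t (by omega) ht2
      rw [hrun]
      have hcast : ((j - i : Nat) : Int) = (j : Int) - (i : Int) := by omega
      rw [hcast]
      ring
    · simp [hi]
      have hni : n - i = 0 := by omega
      simp [hni]

-- ===== VERDICT (by name: the statement is the Claim_ definition above) =====
theorem Alt_SubArray_Count_spec : Claim_equal_Alt_SubArray_Count := by
  intro xs len _ _
  show (pvLoopA xs (List.replicate len.toNat 1) (len - 1).toNat).map PySem.Int.toStr
      = (pvGoB xs len.toNat len.toNat 0).map PySem.Int.toStr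
  have h1 : (len - 1).toNat = len.toNat - 1 := by omega
  rw [h1, pvA_char, pvGoB_char xs len.toNat len.toNat 0 (by omega)]
  simp [List.range_eq_range']
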